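-- pv_equiv track=rewrite | github.com/imsasankvindamuri/MySSG | parser/transliterator.py | HarvardKyotoToIAST
-- ===== SOURCE A (Python) =====
-- hk_to_iast = {
--     "A": "ā", "I": "ī", "U": "ū", "R": "ṛ",
--     "M": "ṃ", "H": "ḥ", "G": "ṅ","J": "ñ",
--     "T": "ṭ", "D": "ḍ", "N": "ṇ", "n": "n",
--     "z": "ś", "S": "ṣ", "L" : "ḻ"
-- }
--
-- def HarvardKyotoToIAST(hkstring : str) -> str:
--     iast_first_pass = ''
--     iast_text = ''
--     i = 0
--
--     while i < len(hkstring):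
--         if hkstring[i] not in hk_to_iast:
--             iast_first_pass += hkstring[i]
--         else:
--             iast_first_pass += hk_to_iast[hkstring[i]]
--         i += 1
--
--     i = 0
--
--     while i < len(iast_first_pass):
--         if iast_first_pass[i] == "ṛ":
--             if iast_first_pass[i + 1] == "ṛ":
--                 iast_text += "ṝ"
--                 i += 2
--             else:
--                 iast_text += iast_first_pass[i]
--                 i += 1
--         else:
--             iast_text += iast_first_pass[i]
--             i += 1
--
--     return iast_text
-- ===== SOURCE B (Python) =====
-- hk_to_iast = {
--     "A": "\u0101", "I": "\u012b", "U": "\u016b", "R": "\u1e5b",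
--     "M": "\u1e43", "H": "\u1e25", "G": "\u1e45", "J": "\u00f1",
--     "T": "\u1e6d", "D": "\u1e0d", "N": "\u1e47", "n": "n",
--     "z": "\u015b", "S": "\u1e63", "L": "\u1e3b"
-- }
--
-- def HarvardKyotoToIAST(hkstring: str) -> str:
--     parts = []
--     n = len(hkstring)
--     i = 0
--     while i < n:
--         c = hkstring[i]
--         if c == "R":
--             if i + 1 < n and hkstring[i + 1] == "R":
--                 parts.append("ṝ")
--                 i += 2
--             else:
--                 parts.append("\u1e5b")
--                 i += 1
--         else:
--             parts.append(hk_to_iast.get(c, c))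
--             i += 1
--     return "".join(parts)
-- ===== Notes on version B (the rewrite author's own statement) =====
-- stated objective: alternative
-- what changed: Replaces A's two staged passes (char-by-char dict translation appended to an intermediate string with +=, then a second lookahead loop merging doubled vocalic r) by one fused while-loop over the source that detects 'RR' directly with a bounds-checked lookahead, collecting pieces in a list joined once; Pre_ excludes strings whose trailing run of 'R' has odd length, on which A raises IndexError.
import Mathlib
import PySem

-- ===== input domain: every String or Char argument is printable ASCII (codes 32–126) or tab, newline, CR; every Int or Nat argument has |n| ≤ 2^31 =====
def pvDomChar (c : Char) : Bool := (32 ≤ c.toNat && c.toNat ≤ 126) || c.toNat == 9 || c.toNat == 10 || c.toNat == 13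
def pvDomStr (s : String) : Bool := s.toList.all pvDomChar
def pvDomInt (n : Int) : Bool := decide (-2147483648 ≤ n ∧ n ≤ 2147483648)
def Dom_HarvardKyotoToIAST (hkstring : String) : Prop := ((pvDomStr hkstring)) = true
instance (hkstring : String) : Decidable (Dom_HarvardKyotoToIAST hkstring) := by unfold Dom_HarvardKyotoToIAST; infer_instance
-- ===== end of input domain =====

-- B fuses A's two staged passes into one bounds-checked lookahead loop over the source string;
-- Pre_ excludes the inputs on which A raises IndexError (odd trailing run of 'R').

-- module-level dict shared by both versions (values are the single chars A's one-char strings hold)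
def hk_to_iast : PySem.Dict Char Char := PySem.Dict.ofList
  [('A', '\u0101'), ('I', '\u012B'), ('U', '\u016B'), ('R', '\u1E5B'),
   ('M', '\u1E43'), ('H', '\u1E25'), ('G', '\u1E45'), ('J', '\u00F1'),
   ('T', '\u1E6D'), ('D', '\u1E0D'), ('N', '\u1E47'), ('n', 'n'),
   ('z', '\u015B'), ('S', '\u1E63'), ('L', '\u1E3B')]

-- ===== PORT A =====
-- first while-loop: build iast_first_pass char by char
def pass1A : List Char → List Char
  | [] => []
  | c :: t => (if hk_to_iast.contains c = false then c else (hk_to_iast.get? c).getD c) :: pass1A t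

-- second while-loop: merge "ṛṛ" into the decomposed "ṝ" (three code points, as in A's literal);
-- on a lone trailing 'ṛ' Python evaluates iast_first_pass[i+1] and raises IndexError — outside Pre_,
-- this port returns the text built so far.
def pass2A : List Char → List Char
  | [] => []
  | c :: t =>
    if c = '\u1E5B' then
      match t with
      | [] => []  -- IndexError in Python (excluded by Pre_)
      | c2 :: t2 =>
        if c2 = '\u1E5B' then 'r' :: '\u0323' :: '\u0304' :: pass2A t2
        else c :: pass2A (c2 :: t2)
    else c :: pass2A t

def HarvardKyotoToIAST (hkstring : String) : String :=
  String.ofList (pass2A (pass1A hkstring.toList))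

-- ===== PORT B =====
-- single fused loop over the source: 'R' with a bounds-checked lookahead, everything else via dict.get
def loopB : List Char → List Char
  | [] => []
  | c :: t =>
    if c = 'R' then
      match t with
      | c2 :: t2 =>
        if c2 = 'R' then 'r' :: '\u0323' :: '\u0304' :: loopB t2
        else '\u1E5B' :: loopB (c2 :: t2)
      | [] => ['\u1E5B']
    else (hk_to_iast.get? c).getD c :: loopB t

def HarvardKyotoToIAST_alt (hkstring : String) : String :=
  String.ofList (loopB hkstring.toList)

-- ===== PRECONDITION & SPEC =====
-- Pre_ excludes exactly the strings whose trailing run of 'R' has odd length: there A's second loop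
-- reads iast_first_pass[i+1] past the end and raises IndexError (A returns on every other input).
def Pre_HarvardKyotoToIAST (hkstring : String) : Prop :=
  (hkstring.toList.reverse.takeWhile (· == 'R')).length % 2 = 0
instance (hkstring : String) : Decidable (Pre_HarvardKyotoToIAST hkstring) := by
  unfold Pre_HarvardKyotoToIAST; infer_instance

def pvWitness_HarvardKyotoToIAST : String := "zaGkaRRcArya"

def Spec_HarvardKyotoToIAST (hkstring : String) (out : String) : Prop := out = HarvardKyotoToIAST_alt hkstring
instance (hkstring : String) (out : String) : Decidable (Spec_HarvardKyotoToIAST hkstring out) := by unfold Spec_HarvardKyotoToIAST; infer_instance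

-- ===== CLAIM (what is proved, stated in full; the proofs are below) =====
def Claim_equal_HarvardKyotoToIAST : Prop := ∀ (hkstring : String), Dom_HarvardKyotoToIAST hkstring → Pre_HarvardKyotoToIAST hkstring → Spec_HarvardKyotoToIAST hkstring (HarvardKyotoToIAST hkstring)

-- ===== LEMMAS AND PROOFS =====

def trB (c : Char) : Char := (hk_to_iast.get? c).getD c

-- A's translated char: when the key is absent .get? is none and the char is kept.
theorem pass1A_eq_map (l : List Char) : pass1A l = l.map trB := by
  induction l with
  | nil => rfl
  | cons c t ih =>
      simp only [pass1A, List.map, ih, trB]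
      cases h : hk_to_iast.contains c with
      | false =>
          rw [(PySem.Dict.get?_eq_none_iff_contains _ _).mpr h]
          simp
      | true => simp

theorem items_lit : hk_to_iast.items =
    [('A', '\u0101'), ('I', '\u012B'), ('U', '\u016B'), ('R', '\u1E5B'),
     ('M', '\u1E43'), ('H', '\u1E25'), ('G', '\u1E45'), ('J', '\u00F1'),
     ('T', '\u1E6D'), ('D', '\u1E0D'), ('N', '\u1E47'), ('n', 'n'),
     ('z', '\u015B'), ('S', '\u1E63'), ('L', '\u1E3B')] := by decide

-- only the key 'R' maps to 'ṛ'
theorem get?_rr (c : Char) (h : hk_to_iast.get? c = some '\u1E5B') : c = 'R' := by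
  have h2 := PySem.Dict.mem_items_of_get?_eq_some hk_to_iast h
  rw [items_lit] at h2
  simp only [List.mem_cons, List.not_mem_nil, or_false, Prod.mk.injEq] at h2
  rcases h2 with ⟨h3, h4⟩|⟨h3, h4⟩|⟨h3, h4⟩|⟨h3, h4⟩|⟨h3, h4⟩|⟨h3, h4⟩|⟨h3, h4⟩|⟨h3, h4⟩|⟨h3, h4⟩|⟨h3, h4⟩|⟨h3, h4⟩|⟨h3, h4⟩|⟨h3, h4⟩|⟨h3, h4⟩|⟨h3, h4⟩ <;>
    first | exact h3 | exact absurd h4 (by decide)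

theorem trB_R : trB 'R' = '\u1E5B' := by decide

theorem trB_ne (c : Char) (hdom : pvDomChar c = true) (hne : c ≠ 'R') : trB c ≠ '\u1E5B' := by
  intro h
  unfold trB at h
  cases hg : hk_to_iast.get? c with
  | none =>
      rw [hg] at h
      simp only [Option.getD_none] at h
      subst h
      exact absurd hdom (by decide)
  | some v =>
      rw [hg] at h
      simp only [Option.getD_some] at h
      subst h
      exact hne (get?_rr c hg)

-- trailing-'R'-run length and its behaviour under cons
def tR (l : List Char) : Nat := (l.reverse.takeWhile (· == 'R')).length

theorem tR_le (l : List Char) : tR l ≤ l.length := by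
  have := (List.takeWhile_sublist (l := l.reverse) (· == 'R')).length_le
  simpa [tR] using this

theorem tR_cons (c : Char) (u : List Char) :
    tR (c :: u) = if tR u = u.length then (if c == 'R' then u.length + 1 else u.length) else tR u := by
  unfold tR
  rw [show (c :: u).reverse = u.reverse ++ [c] from by simp, List.takeWhile_append]
  by_cases h1 : (List.takeWhile (fun x => x == 'R') u.reverse).length = u.reverse.length
  · rw [if_pos h1]
    simp only [List.length_reverse] at h1
    rw [if_pos h1]
    cases hc : (c == 'R') with
    | true => simp [List.takeWhile, hc]
    | false => simp [List.takeWhile, hc]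
  · rw [if_neg h1]
    simp only [List.length_reverse] at h1
    rw [if_neg h1]

theorem tR_cons_ne (c : Char) (u : List Char) (h : c ≠ 'R') : tR (c :: u) = tR u := by
  have hb : (c == 'R') = false := by simpa using h
  simp only [tR_cons, hb, Bool.false_eq_true, if_false]
  split_ifs with h1
  · exact h1.symm
  · rfl

theorem tR_cons_R (u : List Char) : tR ('R' :: u) = if tR u = u.length then u.length + 1 else tR u := by
  rw [tR_cons]; simp

theorem tR_RR (t : List Char) : tR ('R' :: 'R' :: t) % 2 = tR t % 2 := by
  have hle := tR_le t
  rw [tR_cons_R, tR_cons_R]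
  split_ifs with h1 h2 h3 <;> simp_all <;> omega

theorem tR_Rx (c : Char) (t : List Char) (h : c ≠ 'R') : tR ('R' :: c :: t) = tR (c :: t) := by
  have hle := tR_le t
  rw [tR_cons_R, tR_cons_ne c t h]
  split_ifs with h1
  · simp at h1; omega
  · rfl

-- the main agreement: on Dom ∧ Pre, A's second pass over the translated chars equals B's fused loop
theorem main_eq : ∀ (l : List Char), (∀ c ∈ l, pvDomChar c = true) → tR l % 2 = 0 →
    pass2A (l.map trB) = loopB l
  | [] => fun _ _ => rfl
  | [c] => fun hdom hpre => by
      have hc : c ≠ 'R' := by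
        intro h; subst h
        rw [tR_cons] at hpre
        simp [tR] at hpre
      have hx : (hk_to_iast.get? c).getD c ≠ '\u1E5B' := trB_ne c (hdom c (by simp)) hc
      simp only [List.map]
      rw [pass2A, loopB]
      simp [hx, hc, show pass2A [] = [] from rfl, show loopB [] = [] from rfl, trB]
  | c1 :: c2 :: t => fun hdom hpre => by
      have hd1 : pvDomChar c1 = true := hdom c1 (by simp)
      have hd2 : pvDomChar c2 = true := hdom c2 (by simp)
      have hdt : ∀ c ∈ c2 :: t, pvDomChar c = true := fun c hc => hdom c (by simp at hc ⊢; tauto)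
      by_cases h1 : c1 = 'R'
      · by_cases h2 : c2 = 'R'
        · -- 'R' 'R' : both merge and recurse on t
          subst h1; subst h2
          have hpret : tR t % 2 = 0 := by rw [← tR_RR]; exact hpre
          have ih := main_eq t (fun c hc => hdom c (by simp [hc])) hpret
          simp only [List.map, trB_R]
          rw [pass2A, loopB]
          simp [ih]
        · -- 'R' x : the lookahead is not 'R'/'ṛ', copy and recurse on c2 :: t
          subst h1
          have hx : trB c2 ≠ '\u1E5B' := trB_ne c2 hd2 h2
          have hpret : tR (c2 :: t) % 2 = 0 := by rw [← tR_Rx c2 t h2]; exact hpre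
          have ih := main_eq (c2 :: t) hdt hpret
          simp only [List.map, trB_R] at ih ⊢
          rw [pass2A, loopB]
          simp [hx, h2, ih]
      · -- ordinary char: copy and recurse on c2 :: t
        have hx : (hk_to_iast.get? c1).getD c1 ≠ '\u1E5B' := trB_ne c1 hd1 h1
        have hpret : tR (c2 :: t) % 2 = 0 := by rw [← tR_cons_ne c1 (c2 :: t) h1]; exact hpre
        have ih := main_eq (c2 :: t) hdt hpret
        simp only [List.map] at ih ⊢
        rw [pass2A, loopB]
        simp only [trB] at ih ⊢
        simp [hx, h1, ih]

-- ===== VERDICT (by name: the statement is the Claim_ definition above) =====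
theorem HarvardKyotoToIAST_spec : Claim_equal_HarvardKyotoToIAST := by
  intro s hdom hpre
  unfold Spec_HarvardKyotoToIAST HarvardKyotoToIAST HarvardKyotoToIAST_alt
  rw [pass1A_eq_map]
  have hdom' : ∀ c ∈ s.toList, pvDomChar c = true := by
    have : s.toList.all pvDomChar = true := hdom
    simpa [List.all_eq_true] using this
  have hpre' : tR s.toList % 2 = 0 := hpre
  rw [main_eq s.toList hdom' hpre']
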